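-- pv_equiv track=rewrite | github.com/danieljhkim/DataStructures-Algorithms | python/leetcode/questions/decode/decode.py | _create_staircase
-- ===== SOURCE A (Python) =====
-- def _create_staircase(nums):
--   """
--   1
--   2 3
--   4 5 7
--   """
--   nums.sort()
--   subsets = []
--   step = 1
--   while len(nums) != 0:
--     if len(nums) >= step:
--       subsets.append(nums[0:step])
--       nums = nums[step:]
--       step += 1
--     else:
--       subsets.append(nums[0:len(nums)])
--       break
--   return subsets
-- ===== SOURCE B (Python) =====
-- def _create_staircase(nums):
--   nums.sort()  # in place, like A (observable mutation preserved)
--   subsets = []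
--   row = []
--   target = 1
--   for x in nums:
--     row.append(x)
--     if len(row) == target:
--       subsets.append(row)
--       row = []
--       target += 1
--   if row:
--     subsets.append(row)
--   return subsets
-- ===== Notes on version B (the rewrite author's own statement) =====
-- stated objective: faster
-- what changed: Replaces A's while-loop that repeatedly slices off and copies the remaining suffix (subsets.append(nums[0:step]); nums = nums[step:]) by a single element-by-element pass that accumulates the current row and emits it when it reaches the growing target size, so no suffix copies are made.
import Mathlib
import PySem

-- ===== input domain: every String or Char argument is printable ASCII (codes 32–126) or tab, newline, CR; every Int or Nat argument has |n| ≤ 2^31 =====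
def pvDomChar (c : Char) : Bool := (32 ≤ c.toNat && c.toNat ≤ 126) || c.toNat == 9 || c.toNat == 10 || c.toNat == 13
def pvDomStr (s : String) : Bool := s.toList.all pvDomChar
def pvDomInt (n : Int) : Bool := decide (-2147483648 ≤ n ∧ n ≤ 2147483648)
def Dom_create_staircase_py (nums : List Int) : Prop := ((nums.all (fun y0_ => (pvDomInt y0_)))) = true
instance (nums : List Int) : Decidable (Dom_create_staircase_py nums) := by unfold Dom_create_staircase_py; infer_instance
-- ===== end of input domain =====

-- B differs from A only in loop structure (single element pass vs repeated slicing);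
-- the equivalence is about the return value; both Pythons sort the argument in place.

-- ===== PORT A =====
-- A's while-loop; the Python 'step' (which starts at 1) is represented as k+1.
-- nums[0:step] / nums[step:] / nums[0:len(nums)] are the PySem slices below.
def create_staircase_py_loopA (nums : List Int) (k : Nat) : List (List Int) :=
  if nums.length = 0 then []
  else if k + 1 ≤ nums.length then
    PySem.List.slice nums (some 0) (some ((k + 1 : Nat) : Int)) ::
      create_staircase_py_loopA (PySem.List.slice nums (some ((k + 1 : Nat) : Int)) none) (k + 1)
  else [PySem.List.slice nums (some 0) (some (nums.length : Int))]
termination_by nums.length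
decreasing_by
  have h := PySem.List.slice_from_natCast nums (k + 1)
  push_cast at h ⊢
  rw [h]
  simp
  omega

def create_staircase_py (nums : List Int) : List (List Int) :=
  create_staircase_py_loopA (PySem.List.sorted nums (fun x => x) false) 0

-- ===== PORT B =====
-- B's per-element state: (subsets so far, current row, current target size).
def create_staircase_py_stepB (st : List (List Int) × List Int × Nat) (x : Int) :
    List (List Int) × List Int × Nat :=
  let row := st.2.1 ++ [x]
  if row.length = st.2.2 then (st.1 ++ [row], [], st.2.2 + 1) else (st.1, row, st.2.2)

def create_staircase_py_alt (nums : List Int) : List (List Int) :=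
  let st := (PySem.List.sorted nums (fun x => x) false).foldl create_staircase_py_stepB ([], [], 1)
  if st.2.1 = [] then st.1 else st.1 ++ [st.2.1]

-- ===== PRECONDITION & SPEC =====
def Spec_create_staircase_py (nums : List Int) (out : List (List Int)) : Prop := out = create_staircase_py_alt nums
instance (nums : List Int) (out : List (List Int)) : Decidable (Spec_create_staircase_py nums out) := by unfold Spec_create_staircase_py; infer_instance

-- ===== CLAIM (what is proved, stated in full; the proofs are below) =====
def Claim_equal_create_staircase_py : Prop := ∀ (nums : List Int), Dom_create_staircase_py nums → Spec_create_staircase_py nums (create_staircase_py nums)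

-- ===== LEMMAS AND PROOFS =====

-- Folding B's step over xs starting with a partially filled row either leaves one
-- (still short) row, or completes one row of exactly t elements and continues fresh.
lemma stairs_fill (xs : List Int) : ∀ (row : List Int) (acc : List (List Int)) (t : Nat),
    row.length < t →
    xs.foldl create_staircase_py_stepB (acc, row, t) =
      if xs.length + row.length < t then (acc, row ++ xs, t)
      else (xs.drop (t - row.length)).foldl create_staircase_py_stepB
            (acc ++ [row ++ xs.take (t - row.length)], [], t + 1) := by
  induction xs with
  | nil => intro row acc t h; simp [h]
  | cons x rest ih =>
    intro row acc t h
    simp only [List.foldl_cons, create_staircase_py_stepB]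
    by_cases hfull : (row ++ [x]).length = t
    · simp only [hfull]
      have ht : t - row.length = 1 := by simp at hfull; omega
      have hge : ¬ ((x :: rest).length + row.length < t) := by simp at hfull ⊢; omega
      simp [← hfull]
    · simp only [if_neg hfull]
      have h' : (row ++ [x]).length < t := by simp at hfull ⊢; omega
      rw [ih (row ++ [x]) acc t h']
      have hlen : (row ++ [x]).length = row.length + 1 := by simp
      by_cases hcase : rest.length + (row.length + 1) < t
      · have : (x :: rest).length + row.length < t := by simp; omega
        simp only [hlen, if_pos hcase]
        rw [if_pos this]
        simp
      · have h2 : ¬ ((x :: rest).length + row.length < t) := by simp; omega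
        have hm : t - row.length = (t - (row.length + 1)) + 1 := by omega
        simp only [hlen, if_neg hcase, if_neg h2, hm]
        simp [List.take_succ_cons, List.drop_succ_cons, List.append_assoc]

-- One unfolding of A's loop in each of its two returning branches.
lemma loopA_step (xs : List Int) (k : Nat) (h0 : ¬ xs.length = 0) (hk : k + 1 ≤ xs.length) :
    create_staircase_py_loopA xs k =
      xs.take (k + 1) :: create_staircase_py_loopA (xs.drop (k + 1)) (k + 1) := by
  rw [create_staircase_py_loopA, if_neg h0, if_pos hk]
  rw [PySem.List.slice_from_natCast]
  congr 1
  simpa using PySem.List.slice_to_natCast xs (k + 1)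

lemma loopA_last (xs : List Int) (k : Nat) (h0 : ¬ xs.length = 0) (hk : ¬ k + 1 ≤ xs.length) :
    create_staircase_py_loopA xs k = [xs] := by
  rw [create_staircase_py_loopA, if_neg h0, if_neg hk]
  congr 1
  simpa using PySem.List.slice_to_natCast xs xs.length

-- B's fold starting from a fresh row with target k+1 appends exactly A's loop result.
lemma stairs_main (n : Nat) : ∀ (xs : List Int), xs.length ≤ n → ∀ (k : Nat) (acc : List (List Int)),
    (let st := xs.foldl create_staircase_py_stepB (acc, [], k + 1);
     if st.2.1 = [] then st.1 else st.1 ++ [st.2.1]) =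
      acc ++ create_staircase_py_loopA xs k := by
  induction n with
  | zero =>
    intro xs hxs k acc
    have : xs = [] := List.eq_nil_of_length_eq_zero (by omega)
    subst this
    rw [create_staircase_py_loopA]
    simp
  | succ n ih =>
    intro xs hxs k acc
    by_cases hnil : xs = []
    · subst hnil
      rw [create_staircase_py_loopA]
      simp
    · have hpos : xs.length ≠ 0 := by simp [hnil]
      rw [stairs_fill xs [] acc (k + 1) (by simp)]
      simp only [List.length_nil, Nat.add_zero, Nat.sub_zero, List.nil_append]
      by_cases hk : k + 1 ≤ xs.length
      · rw [if_neg (by omega : ¬ xs.length < k + 1)]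
        have hdl : (xs.drop (k + 1)).length ≤ n := by
          have := List.length_drop (l := xs) (i := k + 1); omega
        rw [ih (xs.drop (k + 1)) hdl (k + 1) (acc ++ [xs.take (k + 1)])]
        rw [loopA_step xs k hpos hk]
        simp [List.append_assoc]
      · rw [if_pos (by omega : xs.length < k + 1)]
        rw [loopA_last xs k hpos hk]
        simp [hnil]

-- ===== VERDICT (by name: the statement is the Claim_ definition above) =====
theorem create_staircase_py_spec : Claim_equal_create_staircase_py := by
  intro nums _
  unfold Spec_create_staircase_py create_staircase_py create_staircase_py_alt
  exact (stairs_main (PySem.List.sorted nums (fun x => x) false).length _ le_rfl 0 []).symm
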